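-- pv_equiv track=rewrite | github.com/aaarvs07ranger/suzzallo-engine | solver/engine.py | parse_day_string
-- ===== SOURCE A (Python) =====
-- from typing import Any, Dict, List, Optional, Sequence
--
-- DAY_MAP = {"M": 1, "T": 2, "W": 3, "Th": 4, "F": 5}
--
-- def parse_day_string(days_str: str) -> List[int]:
--     if not days_str:
--         return []
--
--     days: List[int] = []
--     i = 0
--     while i < len(days_str):
--         if days_str[i : i + 2] == "Th":
--             days.append(DAY_MAP["Th"])
--             i += 2
--         elif days_str[i] in DAY_MAP:
--             days.append(DAY_MAP[days_str[i]])
--             i += 1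
--         else:
--             i += 1
--     return days
-- ===== SOURCE B (Python) =====
-- from typing import List
--
-- DAY_MAP = {"M": 1, "T": 2, "W": 3, "Th": 4, "F": 5}
--
-- def parse_day_string(days_str: str) -> List[int]:
--     # scan right-to-left, emitting tokens back-to-front, then reverse once
--     days: List[int] = []
--     i = len(days_str)
--     while i > 0:
--         if i >= 2 and days_str[i - 2 : i] == "Th":
--             days.append(DAY_MAP["Th"])
--             i -= 2
--         elif days_str[i - 1] in DAY_MAP:
--             days.append(DAY_MAP[days_str[i - 1]])
--             i -= 1
--         else:
--             i -= 1
--     days.reverse()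
--     return days
-- ===== Notes on version B (the rewrite author's own statement) =====
-- stated objective: alternative
-- what changed: B scans the string right-to-left (matching 'Th' as a suffix ending at the cursor) and builds the token list back-to-front with a single final reverse, instead of A's left-to-right scan with a two-character lookahead; equivalence rests on the fact that greedy 'Th' tokenization is direction-independent.
import Mathlib
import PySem

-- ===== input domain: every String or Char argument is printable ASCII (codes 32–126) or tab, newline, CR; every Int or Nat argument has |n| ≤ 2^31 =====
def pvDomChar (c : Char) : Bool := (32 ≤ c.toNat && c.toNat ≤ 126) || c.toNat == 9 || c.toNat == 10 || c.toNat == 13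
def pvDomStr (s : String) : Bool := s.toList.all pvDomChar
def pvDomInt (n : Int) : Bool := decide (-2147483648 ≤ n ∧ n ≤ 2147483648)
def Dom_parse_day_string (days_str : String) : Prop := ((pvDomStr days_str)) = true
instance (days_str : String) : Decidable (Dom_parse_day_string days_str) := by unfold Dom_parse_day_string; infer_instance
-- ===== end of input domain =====

-- B scans right-to-left building the token list back-to-front (one final reverse) instead of A's left-to-right lookahead scan; alternative decomposition, same cost.


-- ===== PORT A =====
def DAY_MAP : PySem.Dict String Int :=
  PySem.Dict.ofList [("M", 1), ("T", 2), ("W", 3), ("Th", 4), ("F", 5)]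

-- A's while loop: state = remaining suffix (the chars from index i on) and the accumulated days
def pvLoopA : List Char → List Int → List Int
  | [], days => days
  | c :: rest, days =>
    if List.take 2 (c :: rest) = ['T', 'h'] then
      pvLoopA rest.tail (days ++ [DAY_MAP.getD "Th" 0])
    else if (DAY_MAP.get? (String.ofList [c])).isSome then
      pvLoopA rest (days ++ [DAY_MAP.getD (String.ofList [c]) 0])
    else
      pvLoopA rest days
termination_by cs _ => cs.length
decreasing_by all_goals simp [List.length_tail]

def parse_day_string (days_str : String) : List Int :=
  if days_str.toList = [] then [] else pvLoopA days_str.toList []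

-- ===== PORT B =====
-- B's while loop: i counts down from len; slice days_str[i-2:i] is take 2 of drop (i-2)
def pvLoopB (cs : List Char) : Nat → List Int → List Int
  | 0, days => days
  | i + 1, days =>
    if 2 ≤ i + 1 ∧ List.take 2 (cs.drop (i + 1 - 2)) = ['T', 'h'] then
      pvLoopB cs (i - 1) (days ++ [DAY_MAP.getD "Th" 0])
    else if (DAY_MAP.get? (String.ofList [cs.getD i ' '])).isSome then
      pvLoopB cs i (days ++ [DAY_MAP.getD (String.ofList [cs.getD i ' ']) 0])
    else
      pvLoopB cs i days

def parse_day_string_alt (days_str : String) : List Int :=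
  (pvLoopB days_str.toList days_str.toList.length []).reverse

-- ===== PRECONDITION & SPEC =====
def Spec_parse_day_string (days_str : String) (out : List Int) : Prop := out = parse_day_string_alt days_str
instance (days_str : String) (out : List Int) : Decidable (Spec_parse_day_string days_str out) := by unfold Spec_parse_day_string; infer_instance

-- ===== CLAIM (what is proved, stated in full; the proofs are below) =====
def Claim_equal_parse_day_string : Prop := ∀ (days_str : String), Dom_parse_day_string days_str → Spec_parse_day_string days_str (parse_day_string days_str)

-- ===== LEMMAS AND PROOFS =====

-- token of one single character, as both Pythons compute it: DAY_MAP value if the char is a key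
def pvTok (c : Char) : List Int :=
  if (DAY_MAP.get? (String.ofList [c])).isSome then [DAY_MAP.getD (String.ofList [c]) 0] else []


-- canonical left-to-right tokenization (A's result)
def pvF : List Char → List Int
  | 'T' :: 'h' :: t => 4 :: pvF t
  | c :: t => pvTok c ++ pvF t
  | [] => []

-- right-to-left tokenization on the REVERSED string (B's result before the final reverse)
def pvR : List Char → List Int
  | 'h' :: 'T' :: t => 4 :: pvR t
  | c :: t => pvTok c ++ pvR t
  | [] => []

theorem pvLoopA_eq (cs : List Char) : ∀ days, pvLoopA cs days = days ++ pvF cs := by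
  induction cs using pvF.induct with
  | case1 t ih =>
    intro days
    rw [pvLoopA, pvF]
    simp [ih]
    decide
  | case2 c t h1 ih =>
    intro days
    rw [pvLoopA, pvF]
    · have hne : List.take 2 (c :: t) ≠ ['T', 'h'] := by
        intro h
        cases t with
        | nil => simp at h
        | cons a t' => simp at h; exact h1 t' h.1 (by rw [h.2])
      rw [if_neg hne]
      unfold pvTok
      split
      · simp [ih]
      · simp [ih]
    · exact h1
  | case3 => intro days; rw [pvLoopA]; simp [pvF]

theorem pvF_cons (c : Char) (t : List Char) (h : ∀ t', c = 'T' → t = 'h' :: t' → False) :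
    pvF (c :: t) = pvTok c ++ pvF t := by
  rw [pvF]
  exact h

theorem pvR_cons (c : Char) (t : List Char) (h : ∀ t', c = 'h' → t = 'T' :: t' → False) :
    pvR (c :: t) = pvTok c ++ pvR t := by
  rw [pvR]
  exact h

theorem pvTok_reverse (c : Char) : (pvTok c).reverse = pvTok c := by
  unfold pvTok; split <;> simp

theorem take_reverse_succ (cs : List Char) (j : Nat) (hj : j < cs.length) :
    (cs.take (j + 1)).reverse = cs[j] :: (cs.take j).reverse := by
  rw [List.take_add_one]
  simp [List.getElem?_eq_getElem hj]

theorem pvF_append (xs : List Char) (c : Char) (ys : List Char) (hc : c ≠ 'h') :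
    pvF (xs ++ c :: ys) = pvF xs ++ pvF (c :: ys) := by
  induction xs using pvF.induct with
  | case1 t ih =>
    rw [show ('T' :: 'h' :: t) ++ c :: ys = 'T' :: 'h' :: (t ++ c :: ys) from rfl, pvF, pvF, ih]
    simp
  | case2 x t h1 ih =>
    rw [show (x :: t) ++ c :: ys = x :: (t ++ c :: ys) from rfl]
    rw [pvF_cons x t h1, pvF_cons x (t ++ c :: ys), ih]
    · simp
    · intro t1 hx ht
      cases t with
      | nil => simp at ht; exact hc ht.1
      | cons a t' => simp at ht; exact h1 t' hx (by rw [ht.1])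
  | case3 => simp [pvF]

theorem pvF_append_h (xs : List Char) (h : xs.getLast? ≠ some 'T') :
    pvF (xs ++ ['h']) = pvF xs := by
  induction xs using pvF.induct with
  | case1 t ih =>
    rw [show ('T' :: 'h' :: t) ++ ['h'] = 'T' :: 'h' :: (t ++ ['h']) from rfl, pvF, pvF, ih]
    cases t with
    | nil => simp
    | cons a t' => simpa [List.getLast?_cons_cons] using h
  | case2 x t h1 ih =>
    rw [show (x :: t) ++ ['h'] = x :: (t ++ ['h']) from rfl]
    have hx : ∀ t1, x = 'T' → t ++ ['h'] = 'h' :: t1 → False := by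
      intro t1 hxT ht
      cases t with
      | nil =>
        apply h
        rw [hxT]
        rfl
      | cons a t' => simp at ht; exact h1 t' hxT (by rw [ht.1])
    rw [pvF_cons x (t ++ ['h']) hx, pvF_cons x t h1]
    congr 1
    apply ih
    cases t with
    | nil => simp
    | cons a t' => simpa [List.getLast?_cons_cons] using h
  | case3 => simp [pvF, pvTok]; decide

theorem pvR_eq_pvF (l : List Char) : pvR l = (pvF l.reverse).reverse := by
  induction l using pvR.induct with
  | case1 t ih =>
    rw [pvR, ih]
    rw [show ('h' :: 'T' :: t).reverse = t.reverse ++ 'T' :: ['h'] from by simp]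
    rw [pvF_append t.reverse 'T' ['h'] (by decide)]
    rw [show pvF ('T' :: ['h']) = [4] from by decide]
    simp
  | case2 c t h1 ih =>
    rw [pvR_cons c t h1, ih]
    by_cases hc : c = 'h'
    · subst hc
      have hhead : t.reverse.getLast? ≠ some 'T' := by
        rw [List.getLast?_reverse]
        intro hh
        cases t with
        | nil => simp at hh
        | cons a t' => simp at hh; exact h1 t' rfl (by rw [hh])
      rw [show ('h' :: t).reverse = t.reverse ++ ['h'] from by simp]
      rw [pvF_append_h t.reverse hhead]
      rw [show pvTok 'h' = [] from by decide]
      simp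
    · rw [show (c :: t).reverse = t.reverse ++ c :: [] from by simp]
      rw [pvF_append t.reverse c [] hc]
      rw [pvF_cons c [] (by intro t1 _ ht; cases ht)]
      simp [pvTok_reverse, pvF]
  | case3 => simp [pvR, pvF]

theorem pvLoopB_eq (cs : List Char) :
    ∀ i, i ≤ cs.length → ∀ days, pvLoopB cs i days = days ++ pvR ((cs.take i).reverse) := by
  intro i
  induction i using Nat.strong_induction_on with
  | _ i IH =>
    match i with
    | 0 => intro _ days; simp [pvLoopB, pvR]
    | (j + 1) =>
      intro hlen days
      have hj : j < cs.length := by omega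
      rw [pvLoopB]
      by_cases hcond : 2 ≤ j + 1 ∧ List.take 2 (cs.drop (j + 1 - 2)) = ['T', 'h']
      · rw [if_pos hcond]
        obtain ⟨h2, hth⟩ := hcond
        obtain ⟨k, rfl⟩ : ∃ k, j = k + 1 := ⟨j - 1, by omega⟩
        have hk : k < cs.length := by omega
        have hdrop : cs.drop k = cs[k] :: cs[k + 1] :: cs.drop (k + 1 + 1) := by
          rw [List.drop_eq_getElem_cons hk, List.drop_eq_getElem_cons hj]
        rw [show k + 1 + 1 - 2 = k from by omega, hdrop] at hth
        simp only [List.take_succ_cons, List.take_zero, List.cons.injEq, and_true] at hth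
        rw [show k + 1 - 1 = k from by omega]
        rw [IH k (by omega) (by omega)]
        have hsplit : (cs.take (k + 1 + 1)).reverse = 'h' :: 'T' :: (cs.take k).reverse := by
          rw [take_reverse_succ cs (k + 1) hj, take_reverse_succ cs k hk, hth.1, hth.2]
        rw [hsplit, pvR]
        rw [show DAY_MAP.getD "Th" 0 = 4 from by decide]
        simp
      · rw [if_neg hcond]
        have hget : cs.getD j ' ' = cs[j] := List.getD_eq_getElem cs ' ' hj
        have hrec : (cs.take (j + 1)).reverse = cs[j] :: (cs.take j).reverse :=
          take_reverse_succ cs j hj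
        have hnomatch : ∀ t1, cs[j] = 'h' → (cs.take j).reverse = 'T' :: t1 → False := by
          intro t1 hch ht
          apply hcond
          have hj0 : 1 ≤ j := by
            by_contra h0
            have : j = 0 := by omega
            subst this
            simp at ht
          obtain ⟨k, rfl⟩ : ∃ k, j = k + 1 := ⟨j - 1, by omega⟩
          have hk : k < cs.length := by omega
          rw [take_reverse_succ cs k hk] at ht
          have hT : cs[k] = 'T' := List.head_eq_of_cons_eq ht
          refine ⟨by omega, ?_⟩
          have hdrop : cs.drop k = cs[k] :: cs[k + 1] :: cs.drop (k + 1 + 1) := by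
            rw [List.drop_eq_getElem_cons hk, List.drop_eq_getElem_cons hj]
          rw [show k + 1 + 1 - 2 = k from by omega, hdrop, hT, hch]
          rfl
        rw [hrec, pvR_cons _ _ hnomatch]
        unfold pvTok
        rw [hget]
        split
        · rw [IH j (by omega) (by omega)]
          simp
        · rw [IH j (by omega) (by omega)]
          simp

-- ===== VERDICT (by name: the statement is the Claim_ definition above) =====
theorem parse_day_string_spec : Claim_equal_parse_day_string := by
  intro s _
  unfold Spec_parse_day_string parse_day_string parse_day_string_alt
  rw [pvLoopB_eq s.toList s.toList.length (le_refl _) []]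
  rw [List.take_length, pvR_eq_pvF, List.reverse_reverse]
  simp only [List.nil_append, List.reverse_reverse]
  by_cases hnil : s.toList = []
  · rw [if_pos hnil, hnil]
    simp [pvF]
  · rw [if_neg hnil, pvLoopA_eq]
    simp
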